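-- pv_equiv track=rewrite | github.com/wndlthsk/algorithm-study | week17/조승빈/석유 시추.py | solution
-- ===== SOURCE A (Python) =====
-- from collections import deque
--
-- def solution(land):
--     answer = 0
--     ans ={}
--     q= deque()
--     nx = [-1,1,0,0]
--     ny = [0,0,-1,1]
--     mapX = len(land)
--     mapY = len(land[0])
--     arr = [0]* mapY
--     for x in range(mapX):
--         for y in range(mapY):
--             if land[x][y] == 1:
--                 cnt = 0
--                 location=[]
--                 location.append((x,y))
--                 land[x][y] = 0
--                 q.append((x,y))
--                 #bfs로 한덩어리의 석유량을 계산
--                 while q: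
--                     pX,pY= q.popleft()
--                     land[pX][pY] = 0 #방문처리
--                     cnt+=1
--                     for i in range(4):
--                         moveX = pX+nx[i]
--                         moveY = pY+ny[i]
--                         if moveX<0 or moveX >= mapX or moveY<0 or moveY>=mapY:
--                             continue
--                         if land[moveX][moveY] == 1:
--                             q.append((moveX,moveY))
--                             land[moveX][moveY] = 0 #방문처리를 할 때 꼭 넣을때 해라
--                             location.append((moveX,moveY))
--
--                 memo = set()
--                 for i in location:
--                     pox,poy =i
--                     if poy not in memo: #같은(중복된 열이면) 스킵
--                         memo.add(poy)
--                         arr[poy]+=cnt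
--
--     return max(arr)
-- ===== SOURCE B (Python) =====
-- def solution(land):
--     rows = len(land)
--     cols = len(land[0])
--     # A 4-connected component always spans a contiguous interval of columns, so it is
--     # enough to record its size and leftmost/rightmost column; the per-column totals are
--     # range updates on a difference array, and the answer is one prefix-sum max sweep.
--     diff = [0] * (cols + 1)
--     for sx in range(rows):
--         for sy in range(cols):
--             if land[sx][sy] != 1:
--                 continue
--             land[sx][sy] = 0
--             stack = [(sx, sy)]
--             size = 0
--             lo = sy
--             hi = sy
--             while stack:
--                 x, y = stack.pop()
--                 size += 1
--                 for mx, my in ((x - 1, y), (x + 1, y), (x, y - 1), (x, y + 1)):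
--                     if 0 <= mx < rows and 0 <= my < cols and land[mx][my] == 1:
--                         land[mx][my] = 0
--                         if my < lo:
--                             lo = my
--                         if my > hi:
--                             hi = my
--                         stack.append((mx, my))
--             diff[lo] += size
--             diff[hi + 1] -= size
--     best = None
--     acc = 0
--     for d in diff[:cols]:
--         acc += d
--         if best is None or acc > best:
--             best = acc
--     return best
-- ===== Notes on version B (the rewrite author's own statement) =====
-- stated objective: alternative
-- what changed: Instead of recording every visited cell in a location list and deduplicating its columns into per-column additions plus a final max over arr, B tracks only the component size and its leftmost/rightmost column during a stack-based fill (using that a 4-connected component spans a contiguous column interval), posts each component as a range update on a difference array, and reads the answer off a single prefix-sum max sweep.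
-- outside the precondition, e.g. on solution([]): A raises IndexError, B raises IndexError
import Mathlib
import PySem

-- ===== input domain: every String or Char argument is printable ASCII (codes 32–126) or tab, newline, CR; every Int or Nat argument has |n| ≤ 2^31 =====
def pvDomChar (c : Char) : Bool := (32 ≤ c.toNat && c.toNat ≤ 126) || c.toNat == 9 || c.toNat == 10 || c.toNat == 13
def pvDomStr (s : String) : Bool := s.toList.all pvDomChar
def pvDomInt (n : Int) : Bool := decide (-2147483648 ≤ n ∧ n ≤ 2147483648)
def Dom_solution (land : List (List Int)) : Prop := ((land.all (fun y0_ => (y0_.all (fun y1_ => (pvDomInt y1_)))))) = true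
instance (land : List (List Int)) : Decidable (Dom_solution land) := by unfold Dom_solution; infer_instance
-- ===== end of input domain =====

-- B replaces A's per-cell location list, column-set dedup pass and final max over arr by a
-- stack fill that tracks only the component's size and leftmost/rightmost column (a
-- 4-connected component spans a contiguous column interval), posts it as a difference-array
-- range update, and reads the answer off one prefix-sum sweep (objective: alternative).
-- Both Pythons mutate `land` identically (every 1 becomes 0); theorems are about the return value.

-- ===== PORT A =====
-- shared indexing helpers (both Pythons index land[x][y] only after a bounds check,
-- so the getD/toNat access is exact on every admitted input)
def cellGet (g : List (List Int)) (x y : Int) : Int := (g.getD x.toNat []).getD y.toNat 0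
def cellSet (g : List (List Int)) (x y v : Int) : List (List Int) :=
  g.set x.toNat ((g.getD x.toNat []).set y.toNat v)
-- fuel for the while-loops (totality guard only; never exhausted: every enqueued
-- cell zeroes a fresh 1-entry, so iterations are bounded by the number of entries)
def gridFuel (g : List (List Int)) : Nat := (g.map (fun r => r.length)).sum + 1

def nxA : List Int := [-1, 1, 0, 0]
def nyA : List Int := [0, 0, -1, 1]

-- the `while q:` loop of A: pop left, mark, count, scan the four directions by index
def bfsA (mapX mapY : Int) (fuel : Nat) (g : List (List Int)) (q : List (Int × Int))
    (cnt : Int) (loc : List (Int × Int)) :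
    List (List Int) × Int × List (Int × Int) :=
  match fuel, q with
  | _, [] => (g, cnt, loc)
  | 0, _ => (g, cnt, loc)
  | fuel + 1, (pX, pY) :: rest =>
    let g := cellSet g pX pY 0
    let cnt := cnt + 1
    let st := (PySem.List.pyRange 0 4 1).foldl
      (fun (st : List (List Int) × List (Int × Int) × List (Int × Int)) i =>
        let moveX := pX + nxA.getD i.toNat 0
        let moveY := pY + nyA.getD i.toNat 0
        if moveX < 0 ∨ moveX ≥ mapX ∨ moveY < 0 ∨ moveY ≥ mapY then st
        else if cellGet st.1 moveX moveY = 1 then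
          (cellSet st.1 moveX moveY 0, st.2.1 ++ [(moveX, moveY)], st.2.2 ++ [(moveX, moveY)])
        else st) (g, rest, loc)
    bfsA mapX mapY fuel st.1 st.2.1 cnt st.2.2

def solution (land : List (List Int)) : Int :=
  let mapX : Int := PySem.List.len land
  let mapY : Int := PySem.List.len (land.headD [])   -- len(land[0]); empty land excluded by Pre_
  let arr : List Int := List.replicate mapY.toNat 0
  let st := (PySem.List.pyRange 0 mapX 1).foldl (fun st0 x =>
      (PySem.List.pyRange 0 mapY 1).foldl (fun (st : List (List Int) × List Int) y =>
        if cellGet st.1 x y = 1 then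
          let loc : List (Int × Int) := [(x, y)]
          let g := cellSet st.1 x y 0
          let r := bfsA mapX mapY (gridFuel g) g [(x, y)] 0 loc
          let arr2 := (r.2.2.foldl (fun (ms : PySem.Set Int × List Int) p =>
              if PySem.Set.contains ms.1 p.2 then ms
              else (PySem.Set.add ms.1 p.2, ms.2.set p.2.toNat (ms.2.getD p.2.toNat 0 + r.2.1)))
              (PySem.Set.empty, st.2)).2
          (r.1, arr2)
        else st) st0) (land, arr)
  (PySem.List.max? st.2 (fun v => v)).getD 0   -- max(arr); arr = [] (ValueError) excluded by Pre_

-- ===== PORT B =====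
def nbrB (x y : Int) : List (Int × Int) := [(x - 1, y), (x + 1, y), (x, y - 1), (x, y + 1)]

-- the `while stack:` loop of B: pop the LAST cell, count it, push unseen 1-neighbours
-- while maintaining the leftmost/rightmost column seen so far
def dfsB (rows cols : Int) (fuel : Nat) (g : List (List Int)) (stack : List (Int × Int))
    (size lo hi : Int) : List (List Int) × Int × Int × Int :=
  match fuel, PySem.List.pop? stack with
  | _, none => (g, size, lo, hi)
  | 0, some _ => (g, size, lo, hi)
  | fuel + 1, some ((x, y), rest) =>
    let size := size + 1
    let st := (nbrB x y).foldl
      (fun (st : List (List Int) × List (Int × Int) × Int × Int) m =>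
        if 0 ≤ m.1 ∧ m.1 < rows ∧ 0 ≤ m.2 ∧ m.2 < cols ∧ cellGet st.1 m.1 m.2 = 1 then
          (cellSet st.1 m.1 m.2 0, st.2.1 ++ [m],
            (if m.2 < st.2.2.1 then m.2 else st.2.2.1),
            (if m.2 > st.2.2.2 then m.2 else st.2.2.2))
        else st) (g, rest, lo, hi)
    dfsB rows cols fuel st.1 st.2.1 size st.2.2.1 st.2.2.2

def solution_alt (land : List (List Int)) : Int :=
  let rows : Int := PySem.List.len land
  let cols : Int := PySem.List.len (land.headD [])   -- len(land[0]); empty land excluded by Pre_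
  let diff : List Int := List.replicate (cols.toNat + 1) 0
  let st := (PySem.List.pyRange 0 rows 1).foldl (fun st0 sx =>
      (PySem.List.pyRange 0 cols 1).foldl (fun (st : List (List Int) × List Int) sy =>
        if cellGet st.1 sx sy ≠ 1 then st
        else
          let g := cellSet st.1 sx sy 0
          let r := dfsB rows cols (gridFuel g) g [(sx, sy)] 0 sy sy
          let d1 := st.2.set r.2.2.1.toNat (st.2.getD r.2.2.1.toNat 0 + r.2.1)
          let d2 := d1.set (r.2.2.2 + 1).toNat (d1.getD (r.2.2.2 + 1).toNat 0 - r.2.1)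
          (r.1, d2)) st0) (land, diff)
  -- best/acc sweep over diff[:cols]; best = None (cols = 0) is excluded by Pre_
  (((PySem.List.slice st.2 none (some cols)).foldl
      (fun (p : Option Int × Int) d =>
        let acc := p.2 + d
        ((match p.1 with
          | none => some acc
          | some b => if acc > b then some acc else some b), acc)) ((none : Option Int), 0)).1).getD 0

-- ===== PRECONDITION & SPEC =====
-- Pre_ is exactly where the Python A returns: land nonempty (else len(land[0]) raises IndexError),
-- first row nonempty (else max([]) raises ValueError), and no row shorter than land[0]
-- (else land[x][y] raises IndexError while scanning).
def Pre_solution (land : List (List Int)) : Prop :=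
  land ≠ [] ∧ (land.headD []).length ≠ 0 ∧ ∀ r ∈ land, (land.headD []).length ≤ r.length
instance (land : List (List Int)) : Decidable (Pre_solution land) := by
  unfold Pre_solution; infer_instance
def pvWitness_solution : List (List Int) := [[1, 0], [1, 1]]

def Spec_solution (land : List (List Int)) (out : Int) : Prop := out = solution_alt land
instance (land : List (List Int)) (out : Int) : Decidable (Spec_solution land out) := by
  unfold Spec_solution; infer_instance

-- ===== CLAIM (what is proved, stated in full; the proofs are below) =====
def Claim_equal_solution : Prop :=
  ∀ (land : List (List Int)), Dom_solution land → Pre_solution land →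
    Spec_solution land (solution land)

-- ===== LEMMAS AND PROOFS =====
-- ===== proof-side definitions =====
def inb (X Y : Int) (c : Int × Int) : Prop := 0 ≤ c.1 ∧ c.1 < X ∧ 0 ≤ c.2 ∧ c.2 < Y

def val (g : List (List Int)) (i j : Nat) : Int := (g.getD i []).getD j 0

def shape (g : List (List Int)) : List Nat := g.map List.length

def WF (X Y : Int) (g : List (List Int)) : Prop :=
  g.length = X.toNat ∧ ∀ r ∈ g, Y.toNat ≤ r.length

def ones (g : List (List Int)) : Nat := (g.map (fun r => r.count 1)).sum

def nbrList (c : Int × Int) : List (Int × Int) :=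
  [(c.1 - 1, c.2), (c.1 + 1, c.2), (c.1, c.2 - 1), (c.1, c.2 + 1)]

-- connectivity from the seed inside the run's snapshot grid
inductive RS (X Y : Int) (g : List (List Int)) (s : Int × Int) : (Int × Int) → Prop
  | seed : RS X Y g s s
  | step {c d : Int × Int} : RS X Y g s c → d ∈ nbrList c → inb X Y d →
      cellGet g d.1 d.2 = 1 → RS X Y g s d

-- the common abstraction of one cell's four-direction scan: final grid and pushed cells
def procCells (X Y : Int) (g : List (List Int)) : List (Int × Int) → List (List Int) × List (Int × Int)
  | [] => (g, [])
  | m :: ms =>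
    if m.1 < 0 ∨ m.1 ≥ X ∨ m.2 < 0 ∨ m.2 ≥ Y then procCells X Y g ms
    else if cellGet g m.1 m.2 = 1 then
      let r := procCells X Y (cellSet g m.1 m.2 0) ms
      (r.1, m :: r.2)
    else procCells X Y g ms

def loFold (lo : Int) (P : List (Int × Int)) : Int :=
  P.foldl (fun a m => if m.2 < a then m.2 else a) lo
def hiFold (hi : Int) (P : List (Int × Int)) : Int :=
  P.foldl (fun a m => if m.2 > a then m.2 else a) hi

-- the search invariant shared by A's queue run and B's stack run
def LoopInv (X Y : Int) (g0 : List (List Int)) (s : Int × Int) (g : List (List Int))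
    (V : Finset (Int × Int)) (w : List (Int × Int)) : Prop :=
  shape g = shape g0 ∧
  (∀ i j : Nat, val g i j = if ((i : Int), (j : Int)) ∈ V then 0 else val g0 i j) ∧
  w.Nodup ∧ (∀ x ∈ w, x ∈ V) ∧
  (∀ c ∈ V, inb X Y c) ∧ (∀ c ∈ V, RS X Y g0 s c) ∧ s ∈ V ∧
  (∀ c ∈ V, c ∉ w → ∀ d ∈ nbrList c, inb X Y d → cellGet g0 d.1 d.2 = 1 → d ∈ V)

-- prefix-accumulation values of B's final sweep
def accs (a : Int) : List Int → List Int
  | [] => []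
  | d :: ds => (a + d) :: accs (a + d) ds

-- arr-vs-difference-array relation carried around the outer scan
def ArrRel (Y : Int) (arr diff : List Int) : Prop :=
  arr.length = Y.toNat ∧ diff.length = Y.toNat + 1 ∧
  ∀ k : Nat, k < Y.toNat → arr.getD k 0 = (diff.take (k + 1)).sum

-- ===== getD / set primitives =====
theorem getD_set_self {α : Type} {l : List α} {i : Nat} (v d : α) (h : i < l.length) :
    (l.set i v).getD i d = v := by
  simp [List.getD_eq_getElem?_getD, List.getElem?_set_self', h]

theorem getD_set_ne {α : Type} {l : List α} {i j : Nat} (v d : α) (h : i ≠ j) :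
    (l.set i v).getD j d = l.getD j d := by
  simp [List.getD_eq_getElem?_getD, List.getElem?_set_ne h]

theorem set_eq_self_of_getD {l : List Int} {i : Nat} (h : l.getD i 0 = 0) :
    l.set i 0 = l := by
  apply List.ext_getElem?
  intro k
  by_cases hk : k = i
  · subst hk
    by_cases hlt : k < l.length
    · simp [List.getElem?_set_self', hlt, List.getD_eq_getElem?_getD] at h ⊢
      simp_all [List.getElem?_eq_getElem hlt]
    · simp [List.getElem?_eq_none_iff.2 (by simpa using Nat.le_of_not_lt hlt), List.getElem?_set]
      omega
  · simp [List.getElem?_set_ne (fun hh => hk hh.symm)]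

-- ===== cellGet / cellSet / shape lemmas =====
theorem cellGet_eq_val (g : List (List Int)) (x y : Int) :
    cellGet g x y = val g x.toNat y.toNat := rfl

theorem mk_toNat {c : Int × Int} (h1 : 0 ≤ c.1) (h2 : 0 ≤ c.2) :
    (((c.1.toNat : Int), (c.2.toNat : Int)) : Int × Int) = c := by
  obtain ⟨a, b⟩ := c
  simp only [Prod.mk.injEq]
  constructor <;> omega

theorem cellSet_oob {g : List (List Int)} {x : Int} (hx : g.length ≤ x.toNat) (y v : Int) :
    cellSet g x y v = g := by
  unfold cellSet; exact List.set_eq_of_length_le hx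

theorem shape_cellSet (g : List (List Int)) (x y v : Int) :
    shape (cellSet g x y v) = shape g := by
  by_cases hx : x.toNat < g.length
  · have hlen : (cellSet g x y v).length = g.length := by simp [cellSet]
    apply List.ext_getElem (by simp [shape, hlen])
    intro i hi1 hi2
    have hig : i < g.length := by simpa [shape] using hi2
    simp only [shape, List.getElem_map]
    show (cellSet g x y v)[i].length = g[i].length
    unfold cellSet
    by_cases hix : i = x.toNat
    · subst hix
      rw [List.getElem_set_self (by simpa using hx)]
      rw [List.length_set, List.getD_eq_getElem g [] hx]
    · rw [List.getElem_set_ne (by omega)]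
  · rw [cellSet_oob (Nat.le_of_not_lt hx)]

theorem length_of_shape_eq {a b : List (List Int)} (h : shape a = shape b) :
    a.length = b.length := by
  have := congrArg List.length h
  simpa [shape] using this

theorem WF_of_shape {X Y : Int} {g0 g : List (List Int)} (hs : shape g = shape g0)
    (hw : WF X Y g0) : WF X Y g := by
  obtain ⟨h1, h2⟩ := hw
  refine ⟨(length_of_shape_eq hs).trans h1, ?_⟩
  intro r hr
  obtain ⟨i, hi, rfl⟩ := List.getElem_of_mem hr
  have hlen : g[i].length = (shape g)[i]'(by simpa [shape] using hi) := by
    simp [shape]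
  rw [hlen]
  have hi0 : i < g0.length := by rw [← length_of_shape_eq hs]; exact hi
  have : (shape g)[i]'(by simpa [shape] using hi) = g0[i].length := by
    simp only [hs]
    simp [shape]
  rw [this]
  exact h2 _ (List.getElem_mem hi0)

theorem grid_ext {a b : List (List Int)} (hs : shape a = shape b)
    (hpt : ∀ i j : Nat, val a i j = val b i j) : a = b := by
  have hlen := length_of_shape_eq hs
  apply List.ext_getElem hlen
  intro i hia hib
  have hrow : a[i].length = b[i].length := by
    have : (shape a)[i]'(by simpa [shape] using hia) = (shape b)[i]'(by simpa [shape] using hib) := by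
      simp [hs]
    simpa [shape] using this
  apply List.ext_getElem hrow
  intro j hja hjb
  have := hpt i j
  unfold val at this
  rwa [List.getD_eq_getElem a [] hia, List.getD_eq_getElem b [] hib,
    List.getD_eq_getElem _ _ hja, List.getD_eq_getElem _ _ hjb] at this

theorem val_cellSet {g : List (List Int)} {x y : Int}
    (hx : x.toNat < g.length) (hy : y.toNat < (g.getD x.toNat []).length) (v : Int) :
    ∀ i j : Nat, val (cellSet g x y v) i j =
      if i = x.toNat ∧ j = y.toNat then v else val g i j := by
  intro i j
  unfold val cellSet
  by_cases hi : i = x.toNat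
  · subst hi
    rw [getD_set_self _ _ hx]
    by_cases hj : j = y.toNat
    · subst hj
      rw [getD_set_self _ _ hy, if_pos ⟨rfl, rfl⟩]
    · rw [getD_set_ne _ _ (fun h => hj h.symm), if_neg (fun h => hj h.2)]
  · rw [getD_set_ne _ _ (fun h => hi h.symm), if_neg (fun h => hi h.1)]

theorem WF_cellSet {X Y : Int} {g : List (List Int)} (hw : WF X Y g) (x y v : Int) :
    WF X Y (cellSet g x y v) :=
  WF_of_shape (shape_cellSet g x y v) hw

theorem cellSet_noop {X Y : Int} {g : List (List Int)} (hw : WF X Y g)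
    {c : Int × Int} (hc : inb X Y c) (h0 : cellGet g c.1 c.2 = 0) :
    cellSet g c.1 c.2 0 = g := by
  obtain ⟨h1, h2⟩ := hw
  obtain ⟨hx0, hxX, hy0, hyY⟩ := hc
  have hx : c.1.toNat < g.length := by omega
  unfold cellSet
  unfold cellGet at h0
  rw [set_eq_self_of_getD h0]
  rw [List.getD_eq_getElem g [] hx]
  exact List.set_getElem_self ..

-- ===== ones (count of 1-entries) lemmas =====
theorem count_set_zero : ∀ (r : List Int) (j : Nat), j < r.length → r.getD j 0 = 1 →
    r.count 1 = (r.set j 0).count 1 + 1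
  | a :: t, 0, _, h1 => by
    simp at h1; subst h1
    simp [List.count_cons]
  | a :: t, j + 1, hj, h1 => by
    have ih := count_set_zero t j (by simpa using hj) (by simpa using h1)
    simp only [List.set_cons_succ, List.count_cons, ih]
    omega

theorem ones_set : ∀ (g : List (List Int)) (i : Nat) (r' : List Int), i < g.length →
    ones (g.set i r') + (g.getD i []).count 1 = ones g + r'.count 1
  | r :: t, 0, r', _ => by simp [ones]; omega
  | r :: t, i + 1, r', hi => by
    have ih := ones_set t i r' (by simpa using hi)
    simp only [ones, List.set_cons_succ, List.map_cons, List.sum_cons] at ih ⊢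
    simp only [List.getD_cons_succ]
    omega

theorem ones_cellSet_zero {X Y : Int} {g : List (List Int)} (hw : WF X Y g)
    {c : Int × Int} (hc : inb X Y c) (h1 : cellGet g c.1 c.2 = 1) :
    ones g = ones (cellSet g c.1 c.2 0) + 1 := by
  obtain ⟨hl, h2⟩ := hw
  obtain ⟨hx0, hxX, hy0, hyY⟩ := hc
  have hx : c.1.toNat < g.length := by omega
  have hrow : Y.toNat ≤ (g.getD c.1.toNat []).length := by
    rw [List.getD_eq_getElem g [] hx]; exact h2 _ (List.getElem_mem hx)
  have hy : c.2.toNat < (g.getD c.1.toNat []).length := by omega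
  have hset := ones_set g c.1.toNat ((g.getD c.1.toNat []).set c.2.toNat 0) hx
  have hcnt := count_set_zero (g.getD c.1.toNat []) c.2.toNat hy h1
  unfold cellSet
  omega

theorem ones_le_cells : ∀ g : List (List Int), ones g ≤ (g.map (fun r => r.length)).sum
  | [] => by simp [ones]
  | r :: t => by
    have := ones_le_cells t
    have : r.count 1 ≤ r.length := List.count_le_length
    simp only [ones, List.map_cons, List.sum_cons] at *
    omega

theorem ones_lt_gridFuel (g : List (List Int)) : ones g < gridFuel g := by
  have := ones_le_cells g
  unfold gridFuel
  omega

-- ===== neighbour-list facts =====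
theorem nbrList_nodup (c : Int × Int) : (nbrList c).Nodup := by
  obtain ⟨a, b⟩ := c
  simp only [nbrList, List.nodup_cons, List.mem_cons, List.not_mem_nil, or_false,
    List.nodup_nil, and_true, Prod.mk.injEq, not_or, true_and, not_false_eq_true]
  omega

theorem nbr_snd {c d : Int × Int} (h : d ∈ nbrList c) :
    d.2 = c.2 - 1 ∨ d.2 = c.2 ∨ d.2 = c.2 + 1 := by
  simp only [nbrList, List.mem_cons, List.mem_singleton, List.not_mem_nil, or_false] at h
  rcases h with rfl | rfl | rfl | rfl <;> simp

-- ===== procCells specifications =====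
theorem procCells_ones (X Y : Int) : ∀ (ms : List (Int × Int)) (g : List (List Int)), WF X Y g →
    WF X Y (procCells X Y g ms).1 ∧
    ones g = ones (procCells X Y g ms).1 + (procCells X Y g ms).2.length
  | [], g, hw => by simp [procCells, hw]
  | m :: ms, g, hw => by
    by_cases hb : m.1 < 0 ∨ m.1 ≥ X ∨ m.2 < 0 ∨ m.2 ≥ Y
    · simpa [procCells, hb] using procCells_ones X Y ms g hw
    · have hm : inb X Y m := by unfold inb; omega
      by_cases h1 : cellGet g m.1 m.2 = 1
      · have hw' := WF_cellSet hw m.1 m.2 0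
        obtain ⟨ih1, ih2⟩ := procCells_ones X Y ms (cellSet g m.1 m.2 0) hw'
        have hones := ones_cellSet_zero hw hm h1
        simp only [procCells, if_neg hb, if_pos h1]
        exact ⟨ih1, by simp; omega⟩
      · simpa [procCells, hb, h1] using procCells_ones X Y ms g hw

theorem procCells_pt (X Y : Int) : ∀ (ms : List (Int × Int)) (g : List (List Int)),
    ms.Nodup → WF X Y g →
    shape (procCells X Y g ms).1 = shape g ∧
    (∀ i j : Nat, val (procCells X Y g ms).1 i j =
      if ((i : Int), (j : Int)) ∈ (procCells X Y g ms).2 then 0 else val g i j) ∧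
    (∀ d, d ∈ (procCells X Y g ms).2 ↔ d ∈ ms ∧ inb X Y d ∧ cellGet g d.1 d.2 = 1) ∧
    (procCells X Y g ms).2.Nodup
  | [], g, _, hw => by simp [procCells]
  | m :: ms, g, hnd, hw => by
    obtain ⟨hm_not, hnd'⟩ := List.nodup_cons.1 hnd
    by_cases hb : m.1 < 0 ∨ m.1 ≥ X ∨ m.2 < 0 ∨ m.2 ≥ Y
    · have hnin : ¬ inb X Y m := by unfold inb; omega
      obtain ⟨i1, i2, i3, i4⟩ := procCells_pt X Y ms g hnd' hw
      simp only [procCells, if_pos hb]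
      refine ⟨i1, i2, ?_, i4⟩
      intro d
      rw [i3 d]
      constructor
      · rintro ⟨h1, h2, h3⟩; exact ⟨List.mem_cons_of_mem _ h1, h2, h3⟩
      · rintro ⟨h1, h2, h3⟩
        rcases List.mem_cons.1 h1 with rfl | h1'
        · exact absurd h2 hnin
        · exact ⟨h1', h2, h3⟩
    · have hm : inb X Y m := by unfold inb; omega
      obtain ⟨hx0, hxX, hy0, hyY⟩ := hm
      have hx : m.1.toNat < g.length := by obtain ⟨h1, _⟩ := hw; omega
      have hy : m.2.toNat < (g.getD m.1.toNat []).length := by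
        obtain ⟨h1, h2⟩ := hw
        have : Y.toNat ≤ (g.getD m.1.toNat []).length := by
          rw [List.getD_eq_getElem g [] hx]; exact h2 _ (List.getElem_mem hx)
        omega
      by_cases h1 : cellGet g m.1 m.2 = 1
      · have hw' := WF_cellSet hw m.1 m.2 0
        obtain ⟨i1, i2, i3, i4⟩ := procCells_pt X Y ms (cellSet g m.1 m.2 0) hnd' hw'
        have hvs := val_cellSet hx hy 0
        simp only [procCells, if_neg hb, if_pos h1]
        have hPsub : ∀ d, d ∈ (procCells X Y (cellSet g m.1 m.2 0) ms).2 → d ≠ m := by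
          intro d hd rfl
          exact hm_not ((i3 d).1 hd).1
        refine ⟨i1.trans (shape_cellSet g m.1 m.2 0), ?_, ?_, ?_⟩
        · intro i j
          rw [i2 i j, hvs i j]
          by_cases hmem : ((i : Int), (j : Int)) ∈ (procCells X Y (cellSet g m.1 m.2 0) ms).2
          · rw [if_pos hmem, if_pos (List.mem_cons_of_mem _ hmem)]
          · rw [if_neg hmem]
            by_cases hij : i = m.1.toNat ∧ j = m.2.toNat
            · have hthis : (((i : Int), (j : Int)) : Int × Int) = m := by
                rw [hij.1, hij.2]; exact mk_toNat hx0 hy0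
              rw [if_pos hij, if_pos (by rw [hthis]; exact List.mem_cons_self ..)]
            · have hne2 : (((i : Int), (j : Int)) : Int × Int) ≠ m := by
                intro h
                apply hij
                constructor
                · have := congrArg Prod.fst h; simp at this; omega
                · have := congrArg Prod.snd h; simp at this; omega
              rw [if_neg hij, if_neg (by
                intro h
                rcases List.mem_cons.1 h with h' | h'
                · exact hne2 h'
                · exact hmem h')]
        · intro d
          simp only [List.mem_cons]
          constructor
          · rintro (rfl | hd)
            · exact ⟨Or.inl rfl, ⟨hx0, hxX, hy0, hyY⟩, h1⟩
            · obtain ⟨hd1, hd2, hd3⟩ := (i3 d).1 hd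
              refine ⟨Or.inr hd1, hd2, ?_⟩
              have hdm : d ≠ m := fun h => hm_not (h ▸ hd1)
              rw [cellGet_eq_val, hvs] at hd3
              rw [cellGet_eq_val]
              by_cases hij : d.1.toNat = m.1.toNat ∧ d.2.toNat = m.2.toNat
              · exfalso
                apply hdm
                obtain ⟨e1, e2, e3, e4⟩ := hd2
                have hm' := mk_toNat hx0 hy0
                have hd' := mk_toNat e1 e3
                rw [← hd', ← hm', hij.1, hij.2]
              · rwa [if_neg hij] at hd3
          · rintro ⟨hd1, hd2, hd3⟩
            rcases hd1 with rfl | hd1'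
            · exact Or.inl rfl
            · right
              apply (i3 d).2
              refine ⟨hd1', hd2, ?_⟩
              have hdm : d ≠ m := fun h => hm_not (h ▸ hd1')
              rw [cellGet_eq_val, hvs]
              rw [cellGet_eq_val] at hd3
              obtain ⟨e1, e2, e3, e4⟩ := hd2
              by_cases hij : d.1.toNat = m.1.toNat ∧ d.2.toNat = m.2.toNat
              · exfalso
                apply hdm
                have hm' := mk_toNat hx0 hy0
                have hd' := mk_toNat e1 e3
                rw [← hd', ← hm', hij.1, hij.2]
              · rwa [if_neg hij]
        · exact List.nodup_cons.2 ⟨fun h => hPsub _ h rfl, i4⟩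
      · obtain ⟨i1, i2, i3, i4⟩ := procCells_pt X Y ms g hnd' hw
        simp only [procCells, if_neg hb, if_neg h1]
        refine ⟨i1, i2, ?_, i4⟩
        intro d
        rw [i3 d]
        constructor
        · rintro ⟨hd1, hd2, hd3⟩; exact ⟨List.mem_cons_of_mem _ hd1, hd2, hd3⟩
        · rintro ⟨hd1, hd2, hd3⟩
          rcases List.mem_cons.1 hd1 with rfl | hd1'
          · exact absurd hd3 h1
          · exact ⟨hd1', hd2, hd3⟩


-- ===== matching the ports' inner folds with procCells =====
theorem A_dirfold_eq (mapX mapY pX pY : Int)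
    (st0 : List (List Int) × List (Int × Int) × List (Int × Int)) :
    (PySem.List.pyRange 0 4 1).foldl
      (fun (st : List (List Int) × List (Int × Int) × List (Int × Int)) i =>
        let moveX := pX + nxA.getD i.toNat 0
        let moveY := pY + nyA.getD i.toNat 0
        if moveX < 0 ∨ moveX ≥ mapX ∨ moveY < 0 ∨ moveY ≥ mapY then st
        else if cellGet st.1 moveX moveY = 1 then
          (cellSet st.1 moveX moveY 0, st.2.1 ++ [(moveX, moveY)], st.2.2 ++ [(moveX, moveY)])
        else st) st0
    = (nbrList (pX, pY)).foldl
      (fun (st : List (List Int) × List (Int × Int) × List (Int × Int)) m =>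
        if m.1 < 0 ∨ m.1 ≥ mapX ∨ m.2 < 0 ∨ m.2 ≥ mapY then st
        else if cellGet st.1 m.1 m.2 = 1 then
          (cellSet st.1 m.1 m.2 0, st.2.1 ++ [m], st.2.2 ++ [m])
        else st) st0 := by
  have h4 : PySem.List.pyRange 0 4 1 = [0, 1, 2, 3] := by decide
  have t1 : Int.toNat 1 = 1 := rfl
  have t2 : Int.toNat 2 = 2 := rfl
  have t3 : Int.toNat 3 = 3 := rfl
  rw [h4]
  simp only [nbrList, List.foldl_cons, List.foldl_nil, nxA, nyA, t1, t2, t3, Int.toNat_zero,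
    List.getD_cons_zero, List.getD_cons_succ, sub_eq_add_neg, add_zero]

theorem matchA_cells (X Y : Int) : ∀ (ms : List (Int × Int)) (g : List (List Int))
    (q loc : List (Int × Int)),
    ms.foldl (fun (st : List (List Int) × List (Int × Int) × List (Int × Int)) m =>
        if m.1 < 0 ∨ m.1 ≥ X ∨ m.2 < 0 ∨ m.2 ≥ Y then st
        else if cellGet st.1 m.1 m.2 = 1 then
          (cellSet st.1 m.1 m.2 0, st.2.1 ++ [m], st.2.2 ++ [m])
        else st) (g, q, loc)
    = ((procCells X Y g ms).1, q ++ (procCells X Y g ms).2, loc ++ (procCells X Y g ms).2)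
  | [], g, q, loc => by simp [procCells]
  | m :: ms, g, q, loc => by
    by_cases hb : m.1 < 0 ∨ m.1 ≥ X ∨ m.2 < 0 ∨ m.2 ≥ Y
    · simpa [procCells, hb] using matchA_cells X Y ms g q loc
    · by_cases h1 : cellGet g m.1 m.2 = 1
      · have ih := matchA_cells X Y ms (cellSet g m.1 m.2 0) (q ++ [m]) (loc ++ [m])
        simp only [List.foldl_cons, if_neg hb, if_pos h1, procCells, ih]
        simp
      · simpa [procCells, hb, h1] using matchA_cells X Y ms g q loc

theorem matchB_cells (X Y : Int) : ∀ (ms : List (Int × Int)) (g : List (List Int))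
    (tl : List (Int × Int)) (lo hi : Int),
    ms.foldl (fun (st : List (List Int) × List (Int × Int) × Int × Int) m =>
        if 0 ≤ m.1 ∧ m.1 < X ∧ 0 ≤ m.2 ∧ m.2 < Y ∧ cellGet st.1 m.1 m.2 = 1 then
          (cellSet st.1 m.1 m.2 0, st.2.1 ++ [m],
            (if m.2 < st.2.2.1 then m.2 else st.2.2.1),
            (if m.2 > st.2.2.2 then m.2 else st.2.2.2))
        else st) (g, tl, lo, hi)
    = ((procCells X Y g ms).1, tl ++ (procCells X Y g ms).2,
        loFold lo (procCells X Y g ms).2, hiFold hi (procCells X Y g ms).2)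
  | [], g, tl, lo, hi => by simp [procCells, loFold, hiFold]
  | m :: ms, g, tl, lo, hi => by
    by_cases hb : m.1 < 0 ∨ m.1 ≥ X ∨ m.2 < 0 ∨ m.2 ≥ Y
    · have hcond : ¬ (0 ≤ m.1 ∧ m.1 < X ∧ 0 ≤ m.2 ∧ m.2 < Y ∧ cellGet g m.1 m.2 = 1) := by
        intro h; omega
      simpa [procCells, hb, hcond] using matchB_cells X Y ms g tl lo hi
    · by_cases h1 : cellGet g m.1 m.2 = 1
      · have hcond : 0 ≤ m.1 ∧ m.1 < X ∧ 0 ≤ m.2 ∧ m.2 < Y ∧ cellGet g m.1 m.2 = 1 := by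
          refine ⟨by omega, by omega, by omega, by omega, h1⟩
        have ih := matchB_cells X Y ms (cellSet g m.1 m.2 0) (tl ++ [m])
          (if m.2 < lo then m.2 else lo) (if m.2 > hi then m.2 else hi)
        simp only [List.foldl_cons, if_pos hcond, procCells, if_neg hb, if_pos h1, ih]
        simp [loFold, hiFold]
      · have hcond : ¬ (0 ≤ m.1 ∧ m.1 < X ∧ 0 ≤ m.2 ∧ m.2 < Y ∧ cellGet g m.1 m.2 = 1) := by
          intro h; exact h1 h.2.2.2.2
        simpa [procCells, hb, hcond, h1] using matchB_cells X Y ms g tl lo hi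

-- ===== loFold / hiFold facts =====
theorem loFold_spec : ∀ (P : List (Int × Int)) (lo : Int),
    loFold lo P ≤ lo ∧ (∀ m ∈ P, loFold lo P ≤ m.2) ∧
    (loFold lo P = lo ∨ ∃ m ∈ P, loFold lo P = m.2)
  | [], lo => by simp [loFold]
  | m :: P, lo => by
    by_cases hm : m.2 < lo
    · have step : loFold lo (m :: P) = loFold m.2 P := by
        simp only [loFold, List.foldl_cons, if_pos hm]
      obtain ⟨ih1, ih2, ih3⟩ := loFold_spec P m.2
      rw [step]
      refine ⟨by omega, ?_, ?_⟩
      · intro d hd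
        rcases List.mem_cons.1 hd with rfl | hd'
        · exact ih1
        · exact ih2 d hd'
      · rcases ih3 with h | ⟨c, hc, hce⟩
        · right; exact ⟨m, List.mem_cons_self .., h⟩
        · right; exact ⟨c, List.mem_cons_of_mem _ hc, hce⟩
    · have step : loFold lo (m :: P) = loFold lo P := by
        simp only [loFold, List.foldl_cons, if_neg hm]
      obtain ⟨ih1, ih2, ih3⟩ := loFold_spec P lo
      rw [step]
      refine ⟨ih1, ?_, ?_⟩
      · intro d hd
        rcases List.mem_cons.1 hd with rfl | hd'
        · omega
        · exact ih2 d hd'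
      · rcases ih3 with h | ⟨c, hc, hce⟩
        · left; exact h
        · right; exact ⟨c, List.mem_cons_of_mem _ hc, hce⟩

theorem hiFold_spec : ∀ (P : List (Int × Int)) (hi : Int),
    hi ≤ hiFold hi P ∧ (∀ m ∈ P, m.2 ≤ hiFold hi P) ∧
    (hiFold hi P = hi ∨ ∃ m ∈ P, hiFold hi P = m.2)
  | [], hi => by simp [hiFold]
  | m :: P, hi => by
    by_cases hm : m.2 > hi
    · have step : hiFold hi (m :: P) = hiFold m.2 P := by
        simp only [hiFold, List.foldl_cons, if_pos hm]
      obtain ⟨ih1, ih2, ih3⟩ := hiFold_spec P m.2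
      rw [step]
      refine ⟨by omega, ?_, ?_⟩
      · intro d hd
        rcases List.mem_cons.1 hd with rfl | hd'
        · exact ih1
        · exact ih2 d hd'
      · rcases ih3 with h | ⟨c, hc, hce⟩
        · right; exact ⟨m, List.mem_cons_self .., h⟩
        · right; exact ⟨c, List.mem_cons_of_mem _ hc, hce⟩
    · have step : hiFold hi (m :: P) = hiFold hi P := by
        simp only [hiFold, List.foldl_cons, if_neg hm]
      obtain ⟨ih1, ih2, ih3⟩ := hiFold_spec P hi
      rw [step]
      refine ⟨ih1, ?_, ?_⟩
      · intro d hd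
        rcases List.mem_cons.1 hd with rfl | hd'
        · omega
        · exact ih2 d hd'
      · rcases ih3 with h | ⟨c, hc, hce⟩
        · left; exact h
        · right; exact ⟨c, List.mem_cons_of_mem _ hc, hce⟩

-- ===== one worklist step preserves the invariant =====
theorem step_lemma (X Y : Int) (g0 : List (List Int)) (s c : Int × Int)
    (g : List (List Int)) (V : Finset (Int × Int)) (w rest : List (Int × Int))
    (hwf0 : WF X Y g0) (hInv : LoopInv X Y g0 s g V w)
    (hmem : ∀ x, x ∈ w ↔ x = c ∨ x ∈ rest) (hc : c ∉ rest) (hrnd : rest.Nodup) :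
    LoopInv X Y g0 s (procCells X Y g (nbrList c)).1
      (V ∪ (procCells X Y g (nbrList c)).2.toFinset)
      (rest ++ (procCells X Y g (nbrList c)).2) ∧
    (V ∪ (procCells X Y g (nbrList c)).2.toFinset).card
      = V.card + (procCells X Y g (nbrList c)).2.length ∧
    ones g = ones (procCells X Y g (nbrList c)).1 + (procCells X Y g (nbrList c)).2.length := by
  obtain ⟨hshape, hpt, hwnd, hwV, hVin, hVRS, hsV, hclosed⟩ := hInv
  have hwf : WF X Y g := WF_of_shape hshape hwf0
  obtain ⟨pshape, ppt, pmem, pnd⟩ := procCells_pt X Y (nbrList c) g (nbrList_nodup c) hwf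
  have hones := (procCells_ones X Y (nbrList c) g hwf).2
  set P := procCells X Y g (nbrList c) with hP
  -- new cells are not yet in V
  have hnotV : ∀ d ∈ P.2, d ∉ V := by
    intro d hd hdV
    obtain ⟨hd1, hd2, hd3⟩ := (pmem d).1 hd
    obtain ⟨e1, e2, e3, e4⟩ := hd2
    have := hpt d.1.toNat d.2.toNat
    rw [mk_toNat e1 e3, if_pos hdV] at this
    rw [cellGet_eq_val, this] at hd3
    exact absurd hd3 (by norm_num)
  have hcV : c ∈ V := hwV c ((hmem c).2 (Or.inl rfl))
  have hcard : (V ∪ P.2.toFinset).card = V.card + P.2.length := by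
    rw [Finset.card_union_of_disjoint]
    · rw [List.toFinset_card_of_nodup pnd]
    · rw [Finset.disjoint_left]
      intro a haV haP
      exact hnotV a (List.mem_toFinset.1 haP) haV
  refine ⟨⟨pshape.trans hshape, ?_, ?_, ?_, ?_, ?_, Finset.mem_union_left _ hsV, ?_⟩, hcard, hones⟩
  · -- pointwise
    intro i j
    rw [ppt i j]
    by_cases hn : ((i : Int), (j : Int)) ∈ P.2
    · rw [if_pos hn, if_pos (Finset.mem_union_right _ (List.mem_toFinset.2 hn))]
    · rw [if_neg hn, hpt i j]
      by_cases hv : ((i : Int), (j : Int)) ∈ V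
      · rw [if_pos hv, if_pos (Finset.mem_union_left _ hv)]
      · rw [if_neg hv, if_neg (by
          intro h
          rcases Finset.mem_union.1 h with h' | h'
          · exact hv h'
          · exact hn (List.mem_toFinset.1 h'))]
  · -- nodup of rest ++ new
    rw [List.nodup_append]
    refine ⟨hrnd, pnd, ?_⟩
    rintro a ha b hb rfl
    exact hnotV a hb (hwV a ((hmem a).2 (Or.inr ha)))
  · -- worklist ⊆ V'
    intro x hx
    rcases List.mem_append.1 hx with hx' | hx'
    · exact Finset.mem_union_left _ (hwV x ((hmem x).2 (Or.inr hx')))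
    · exact Finset.mem_union_right _ (List.mem_toFinset.2 hx')
  · -- V' ⊆ inb
    intro a ha
    rcases Finset.mem_union.1 ha with h | h
    · exact hVin a h
    · exact ((pmem a).1 (List.mem_toFinset.1 h)).2.1
  · -- RS
    intro a ha
    rcases Finset.mem_union.1 ha with h | h
    · exact hVRS a h
    · obtain ⟨h1, h2, h3⟩ := (pmem a).1 (List.mem_toFinset.1 h)
      have hanotV : a ∉ V := hnotV a (List.mem_toFinset.1 h)
      obtain ⟨e1, e2, e3, e4⟩ := h2
      have hval := hpt a.1.toNat a.2.toNat
      rw [mk_toNat e1 e3, if_neg hanotV] at hval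
      rw [cellGet_eq_val, hval] at h3
      exact RS.step (hVRS c hcV) h1 ⟨e1, e2, e3, e4⟩ h3
  · -- closedness
    intro a ha hanw d hd hdin hd1
    rcases Finset.mem_union.1 ha with haV | haP
    · by_cases hac : a = c
      · subst hac
        by_cases hdV : d ∈ V
        · exact Finset.mem_union_left _ hdV
        · obtain ⟨e1, e2, e3, e4⟩ := id hdin
          have hval := hpt d.1.toNat d.2.toNat
          rw [mk_toNat e1 e3, if_neg hdV] at hval
          have : cellGet g d.1 d.2 = 1 := by rw [cellGet_eq_val, hval]; exact hd1
          exact Finset.mem_union_right _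
            (List.mem_toFinset.2 ((pmem d).2 ⟨hd, hdin, this⟩))
      · have hanotw : a ∉ w := by
          intro haw
          rcases (hmem a).1 haw with rfl | haw'
          · exact hac rfl
          · exact hanw (List.mem_append.2 (Or.inl haw'))
        exact Finset.mem_union_left _ (hclosed a haV hanotw d hd hdin hd1)
    · exact absurd (List.mem_append.2 (Or.inr (List.mem_toFinset.1 haP))) hanw

-- with an empty worklist the visited set is RS-complete
theorem final_complete {X Y : Int} {g0 g : List (List Int)} {s : Int × Int}
    {V : Finset (Int × Int)} (hInv : LoopInv X Y g0 s g V []) :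
    ∀ d, RS X Y g0 s d → d ∈ V := by
  obtain ⟨_, _, _, _, _, _, hsV, hclosed⟩ := hInv
  intro d h
  induction h with
  | seed => exact hsV
  | step hc hnbr hinb h1 ih => exact hclosed _ ih (by simp) _ hnbr hinb h1

-- ===== the two searches, characterised against the invariant =====
theorem runA (X Y : Int) (g0 : List (List Int)) (s : Int × Int) (hwf0 : WF X Y g0) :
    ∀ (fuel : Nat) (g : List (List Int)) (V : Finset (Int × Int)) (w : List (Int × Int))
      (cnt : Int) (loc : List (Int × Int)),
      LoopInv X Y g0 s g V w → ones g + w.length ≤ fuel →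
      cnt + (w.length : Int) = V.card → (∀ d, d ∈ loc ↔ d ∈ V) →
      ∃ Vf : Finset (Int × Int),
        LoopInv X Y g0 s (bfsA X Y fuel g w cnt loc).1 Vf [] ∧
        (bfsA X Y fuel g w cnt loc).2.1 = (Vf.card : Int) ∧
        (∀ d, d ∈ (bfsA X Y fuel g w cnt loc).2.2 ↔ d ∈ Vf) := by
  intro fuel
  induction fuel with
  | zero =>
    intro g V w cnt loc hInv hfuel hcnt hloc
    match w with
    | [] =>
      refine ⟨V, hInv, ?_, hloc⟩
      show cnt = (V.card : Int)
      simpa using hcnt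
    | c :: rest => simp at hfuel
  | succ f ih =>
    intro g V w cnt loc hInv hfuel hcnt hloc
    match w with
    | [] =>
      refine ⟨V, hInv, ?_, hloc⟩
      show cnt = (V.card : Int)
      simpa using hcnt
    | ⟨c1, c2⟩ :: rest =>
      have hInv' := hInv
      obtain ⟨hshape, hpt, hwnd, hwV, hVin, hVRS, hsV, hclosed⟩ := hInv'
      have hwf : WF X Y g := WF_of_shape hshape hwf0
      have hcV : (c1, c2) ∈ V := hwV _ (List.mem_cons_self ..)
      have hcin : inb X Y (c1, c2) := hVin _ hcV
      have hc0 : cellGet g c1 c2 = 0 := by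
        obtain ⟨e1, e2, e3, e4⟩ := hcin
        have := hpt c1.toNat c2.toNat
        rw [mk_toNat (c := (c1, c2)) e1 e3, if_pos hcV] at this
        rw [cellGet_eq_val]
        exact this
      have hstep : bfsA X Y (f + 1) g ((c1, c2) :: rest) cnt loc
          = bfsA X Y f (procCells X Y g (nbrList (c1, c2))).1
              (rest ++ (procCells X Y g (nbrList (c1, c2))).2) (cnt + 1)
              (loc ++ (procCells X Y g (nbrList (c1, c2))).2) := by
        show bfsA X Y f ((PySem.List.pyRange 0 4 1).foldl _ (cellSet g c1 c2 0, rest, loc)).1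
            ((PySem.List.pyRange 0 4 1).foldl _ (cellSet g c1 c2 0, rest, loc)).2.1 (cnt + 1)
            ((PySem.List.pyRange 0 4 1).foldl _ (cellSet g c1 c2 0, rest, loc)).2.2 = _
        rw [cellSet_noop hwf hcin hc0]
        rw [A_dirfold_eq X Y c1 c2 (g, rest, loc)]
        rw [matchA_cells X Y (nbrList (c1, c2)) g rest loc]
      rw [hstep]
      obtain ⟨hcnotrest, hrnd⟩ := List.nodup_cons.1 hwnd
      obtain ⟨hInv2, hcard2, hones2⟩ := step_lemma X Y g0 s (c1, c2) g V ((c1, c2) :: rest) rest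
        hwf0 hInv (fun x => by simp [List.mem_cons]) hcnotrest hrnd
      have hfuel2 : ones (procCells X Y g (nbrList (c1, c2))).1
          + (rest ++ (procCells X Y g (nbrList (c1, c2))).2).length ≤ f := by
        simp only [List.length_append]
        simp only [List.length_cons] at hfuel
        omega
      have hcnt2 : (cnt + 1) + ((rest ++ (procCells X Y g (nbrList (c1, c2))).2).length : Int)
          = (V ∪ (procCells X Y g (nbrList (c1, c2))).2.toFinset).card := by
        rw [hcard2]
        simp only [List.length_append, List.length_cons] at hcnt ⊢
        push_cast
        push_cast at hcnt
        omega
      have hloc2 : ∀ d, d ∈ loc ++ (procCells X Y g (nbrList (c1, c2))).2 ↔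
          d ∈ V ∪ (procCells X Y g (nbrList (c1, c2))).2.toFinset := by
        intro d
        rw [List.mem_append, Finset.mem_union, hloc d, List.mem_toFinset]
      exact ih _ _ _ _ _ hInv2 hfuel2 hcnt2 hloc2

theorem dfsB_nil (X Y : Int) (fuel : Nat) (g : List (List Int)) (size lo hi : Int) :
    dfsB X Y fuel g [] size lo hi = (g, size, lo, hi) := by
  have hpop : PySem.List.pop? ([] : List (Int × Int)) = none := by decide
  cases fuel <;> simp [dfsB, hpop]

theorem dfsB_cons (X Y : Int) (f : Nat) (g : List (List Int))
    (stack rest : List (Int × Int)) (c1 c2 size lo hi : Int)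
    (hpop : PySem.List.pop? stack = some ((c1, c2), rest)) :
    dfsB X Y (f + 1) g stack size lo hi =
      dfsB X Y f (procCells X Y g (nbrList (c1, c2))).1
        (rest ++ (procCells X Y g (nbrList (c1, c2))).2) (size + 1)
        (loFold lo (procCells X Y g (nbrList (c1, c2))).2)
        (hiFold hi (procCells X Y g (nbrList (c1, c2))).2) := by
  rw [dfsB.eq_def, hpop]
  have hfold := matchB_cells X Y (nbrList (c1, c2)) g rest lo hi
  show dfsB X Y f ((nbrB c1 c2).foldl _ (g, rest, lo, hi)).1
      ((nbrB c1 c2).foldl _ (g, rest, lo, hi)).2.1 (size + 1)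
      ((nbrB c1 c2).foldl _ (g, rest, lo, hi)).2.2.1
      ((nbrB c1 c2).foldl _ (g, rest, lo, hi)).2.2.2 = _
  have hnbr : nbrB c1 c2 = nbrList (c1, c2) := rfl
  rw [hnbr, hfold]

theorem runB (X Y : Int) (g0 : List (List Int)) (s : Int × Int) (hwf0 : WF X Y g0) :
    ∀ (fuel : Nat) (g : List (List Int)) (V : Finset (Int × Int)) (w : List (Int × Int))
      (size lo hi : Int),
      LoopInv X Y g0 s g V w → ones g + w.length ≤ fuel →
      size + (w.length : Int) = V.card →
      (∀ c ∈ V, lo ≤ c.2) → (∃ c ∈ V, c.2 = lo) →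
      (∀ c ∈ V, c.2 ≤ hi) → (∃ c ∈ V, c.2 = hi) →
      ∃ Vf : Finset (Int × Int),
        LoopInv X Y g0 s (dfsB X Y fuel g w size lo hi).1 Vf [] ∧
        (dfsB X Y fuel g w size lo hi).2.1 = (Vf.card : Int) ∧
        (∀ c ∈ Vf, (dfsB X Y fuel g w size lo hi).2.2.1 ≤ c.2) ∧
        (∃ c ∈ Vf, c.2 = (dfsB X Y fuel g w size lo hi).2.2.1) ∧
        (∀ c ∈ Vf, c.2 ≤ (dfsB X Y fuel g w size lo hi).2.2.2) ∧
        (∃ c ∈ Vf, c.2 = (dfsB X Y fuel g w size lo hi).2.2.2) := by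
  intro fuel
  induction fuel with
  | zero =>
    intro g V w size lo hi hInv hfuel hsize hlo1 hlo2 hhi1 hhi2
    rcases List.eq_nil_or_concat w with rfl | ⟨rest, c, rfl⟩
    · rw [dfsB_nil]
      refine ⟨V, hInv, by simpa using hsize, hlo1, hlo2, hhi1, hhi2⟩
    · simp at hfuel
  | succ f ih =>
    intro g V w size lo hi hInv hfuel hsize hlo1 hlo2 hhi1 hhi2
    rcases List.eq_nil_or_concat w with rfl | ⟨rest, c, rfl⟩
    · rw [dfsB_nil]
      refine ⟨V, hInv, by simpa using hsize, hlo1, hlo2, hhi1, hhi2⟩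
    · obtain ⟨c1, c2⟩ := c
      simp only [List.concat_eq_append] at hInv hfuel hsize ⊢
      rw [dfsB_cons X Y f g _ rest c1 c2 size lo hi (PySem.List.pop?_last rest (c1, c2))]
      have hwnd : (rest ++ [(c1, c2)]).Nodup := hInv.2.2.1
      have hcnotrest : (c1, c2) ∉ rest := by
        intro h
        have := List.disjoint_of_nodup_append hwnd h
        simp at this
      have hrnd : rest.Nodup := hwnd.of_append_left
      obtain ⟨hInv2, hcard2, hones2⟩ := step_lemma X Y g0 s (c1, c2) g V (rest ++ [(c1, c2)])
        rest hwf0 hInv (fun x => by simp [List.mem_append, or_comm]) hcnotrest hrnd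
      set P := procCells X Y g (nbrList (c1, c2)) with hP
      have hfuel2 : ones P.1 + (rest ++ P.2).length ≤ f := by
        simp only [List.length_append] at hfuel ⊢
        simp at hfuel
        omega
      have hsize2 : (size + 1) + ((rest ++ P.2).length : Int)
          = (V ∪ P.2.toFinset).card := by
        rw [hcard2]
        simp only [List.length_append, List.length_cons] at hsize ⊢
        push_cast
        push_cast at hsize
        simp at hsize
        omega
      have hsub : ∀ d ∈ P.2, d ∈ V ∪ P.2.toFinset := fun d hd =>
        Finset.mem_union_right _ (List.mem_toFinset.2 hd)
      obtain ⟨l1, l2, l3⟩ := loFold_spec P.2 lo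
      obtain ⟨u1, u2, u3⟩ := hiFold_spec P.2 hi
      have hlo1' : ∀ c ∈ V ∪ P.2.toFinset, loFold lo P.2 ≤ c.2 := by
        intro c hc
        rcases Finset.mem_union.1 hc with h | h
        · exact le_trans l1 (hlo1 c h)
        · exact l2 c (List.mem_toFinset.1 h)
      have hlo2' : ∃ c ∈ V ∪ P.2.toFinset, c.2 = loFold lo P.2 := by
        rcases l3 with h | ⟨m, hm, hme⟩
        · obtain ⟨c, hc, hce⟩ := hlo2
          exact ⟨c, Finset.mem_union_left _ hc, by rw [hce, h]⟩
        · exact ⟨m, hsub m hm, hme.symm⟩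
      have hhi1' : ∀ c ∈ V ∪ P.2.toFinset, c.2 ≤ hiFold hi P.2 := by
        intro c hc
        rcases Finset.mem_union.1 hc with h | h
        · exact le_trans (hhi1 c h) u1
        · exact u2 c (List.mem_toFinset.1 h)
      have hhi2' : ∃ c ∈ V ∪ P.2.toFinset, c.2 = hiFold hi P.2 := by
        rcases u3 with h | ⟨m, hm, hme⟩
        · obtain ⟨c, hc, hce⟩ := hhi2
          exact ⟨c, Finset.mem_union_left _ hc, by rw [hce, h]⟩
        · exact ⟨m, hsub m hm, hme.symm⟩
      exact ih _ _ _ _ _ _ hInv2 hfuel2 hsize2 hlo1' hlo2' hhi1' hhi2'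

-- ===== discrete intermediate-value property of connected components =====
theorem rs_ivt (X Y : Int) (g0 : List (List Int)) (s : Int × Int) :
    ∀ t, RS X Y g0 s t → ∀ k : Int,
      (s.2 ≤ k ∧ k ≤ t.2) ∨ (t.2 ≤ k ∧ k ≤ s.2) →
      ∃ c, RS X Y g0 s c ∧ c.2 = k := by
  intro t ht
  induction ht with
  | seed =>
    intro k hk
    exact ⟨s, RS.seed, by omega⟩
  | @step c d hc hnbr hinb h1 ih =>
    intro k hk
    by_cases hkd : k = d.2
    · exact ⟨d, RS.step hc hnbr hinb h1, hkd.symm⟩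
    · have hsnd := nbr_snd hnbr
      apply ih
      omega

-- ===== A's memo pass over the location list, pointwise =====
theorem list_eq_of_getD {l1 l2 : List Int} (hlen : l1.length = l2.length)
    (h : ∀ k : Nat, l1.getD k 0 = l2.getD k 0) : l1 = l2 := by
  apply List.ext_getElem hlen
  intro i h1 h2
  have := h i
  rwa [List.getD_eq_getElem _ _ h1, List.getD_eq_getElem _ _ h2] at this

theorem memoA_len (δ : Int) : ∀ (xs : List (Int × Int)) (memo : PySem.Set Int) (arr : List Int),
    ((xs.foldl (fun (ms : PySem.Set Int × List Int) p =>
        if PySem.Set.contains ms.1 p.2 then ms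
        else (PySem.Set.add ms.1 p.2, ms.2.set p.2.toNat (ms.2.getD p.2.toNat 0 + δ)))
      (memo, arr)).2).length = arr.length
  | [], memo, arr => rfl
  | p :: xs, memo, arr => by
    by_cases h : p.2 ∈ memo
    · have hc : PySem.Set.contains memo p.2 = true := (PySem.Set.contains_iff _ _).2 h
      simp only [List.foldl_cons, hc, if_true]
      exact memoA_len δ xs memo arr
    · have hc : PySem.Set.contains memo p.2 = false := by
        rcases Bool.eq_false_or_eq_true (PySem.Set.contains memo p.2) with h' | h'
        · exact absurd ((PySem.Set.contains_iff _ _).1 h') h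
        · exact h'
      simp only [List.foldl_cons, hc, Bool.false_eq_true, if_false]
      simpa using memoA_len δ xs (PySem.Set.add memo p.2)
        (arr.set p.2.toNat (arr.getD p.2.toNat 0 + δ))

theorem memoA_getD (δ : Int) : ∀ (xs : List (Int × Int)) (memo : PySem.Set Int) (arr : List Int),
    (∀ p ∈ xs, 0 ≤ p.2 ∧ p.2.toNat < arr.length) → ∀ k : Nat,
    ((xs.foldl (fun (ms : PySem.Set Int × List Int) p =>
        if PySem.Set.contains ms.1 p.2 then ms
        else (PySem.Set.add ms.1 p.2, ms.2.set p.2.toNat (ms.2.getD p.2.toNat 0 + δ)))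
      (memo, arr)).2).getD k 0
    = arr.getD k 0 + (if (∃ p ∈ xs, p.2 = (k : Int)) ∧ ¬ (k : Int) ∈ memo then δ else 0)
  | [], memo, arr, _, k => by simp
  | p :: xs, memo, arr, hb, k => by
    obtain ⟨hp0, hplt⟩ := hb p (List.mem_cons_self ..)
    by_cases h : p.2 ∈ memo
    · have hc : PySem.Set.contains memo p.2 = true := (PySem.Set.contains_iff _ _).2 h
      have ih := memoA_getD δ xs memo arr (fun q hq => hb q (List.mem_cons_of_mem _ hq)) k
      simp only [List.foldl_cons, hc, if_true, ih]
      congr 1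
      by_cases hex : (∃ q ∈ xs, q.2 = (k : Int)) ∧ ¬ (k : Int) ∈ memo
      · obtain ⟨⟨q, hq, hqk⟩, hkm⟩ := hex
        rw [if_pos ⟨⟨q, hq, hqk⟩, hkm⟩, if_pos ⟨⟨q, List.mem_cons_of_mem _ hq, hqk⟩, hkm⟩]
      · rw [if_neg hex, if_neg (by
          rintro ⟨⟨q, hq, hqk⟩, hkm⟩
          rcases List.mem_cons.1 hq with rfl | hq'
          · exact hkm (hqk ▸ h)
          · exact hex ⟨⟨q, hq', hqk⟩, hkm⟩)]
    · have hc : PySem.Set.contains memo p.2 = false := by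
        rcases Bool.eq_false_or_eq_true (PySem.Set.contains memo p.2) with h' | h'
        · exact absurd ((PySem.Set.contains_iff _ _).1 h') h
        · exact h'
      have ih := memoA_getD δ xs (PySem.Set.add memo p.2)
        (arr.set p.2.toNat (arr.getD p.2.toNat 0 + δ))
        (fun q hq => by simpa using hb q (List.mem_cons_of_mem _ hq)) k
      simp only [List.foldl_cons, hc, Bool.false_eq_true, if_false, ih]
      by_cases hk : p.2 = (k : Int)
      · have hkt : p.2.toNat = k := by rw [hk]; exact Int.toNat_natCast k
        rw [if_neg (fun hcond => hcond.2 ((PySem.Set.mem_add _ _ _).2 (Or.inr hk.symm)))]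
        rw [if_pos ⟨⟨p, List.mem_cons_self .., hk⟩, hk ▸ h⟩]
        rw [hkt, getD_set_self _ _ (hkt ▸ hplt)]
        ring
      · have hkt : p.2.toNat ≠ k := fun he => hk (by rw [← he, Int.toNat_of_nonneg hp0])
        rw [getD_set_ne _ _ hkt]
        congr 1
        by_cases hex : (∃ q ∈ xs, q.2 = (k : Int)) ∧ ¬ (k : Int) ∈ memo
        · obtain ⟨⟨q, hq, hqk⟩, hkm⟩ := hex
          rw [if_pos ⟨⟨q, hq, hqk⟩,
              fun hcond => ((PySem.Set.mem_add _ _ _).1 hcond).elim hkm (fun he => hk he.symm)⟩,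
            if_pos ⟨⟨q, List.mem_cons_of_mem _ hq, hqk⟩, hkm⟩]
        · rw [if_neg (fun hcond =>
              hex ⟨hcond.1, fun hm => hcond.2 ((PySem.Set.mem_add _ _ _).2 (Or.inl hm))⟩),
            if_neg (by
              rintro ⟨⟨q, hq, hqk⟩, hkm⟩
              rcases List.mem_cons.1 hq with rfl | hq'
              · exact hk hqk
              · exact hex ⟨⟨q, hq', hqk⟩, hkm⟩)]

-- ===== difference-array prefix sums =====
theorem sum_take_set : ∀ (l : List Int) (i : Nat) (v : Int) (n : Nat), i < l.length →
    ((l.set i v).take n).sum = (l.take n).sum + (if i < n then v - l.getD i 0 else 0)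
  | [], i, v, n, h => by simp at h
  | a :: t, 0, v, 0, _ => by simp
  | a :: t, 0, v, n + 1, _ => by
    simp only [List.set_cons_zero, List.take_succ_cons, List.sum_cons, List.getD_cons_zero,
      if_pos (Nat.succ_pos n)]
    ring
  | a :: t, i + 1, v, 0, _ => by simp
  | a :: t, i + 1, v, n + 1, h => by
    have ih := sum_take_set t i v n (by simpa using h)
    simp only [List.set_cons_succ, List.take_succ_cons, List.sum_cons, List.getD_cons_succ, ih]
    by_cases hin : i < n
    · rw [if_pos hin, if_pos (by omega)]; ring
    · rw [if_neg hin, if_neg (by omega)]; ring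

-- the per-component update keeps arr equal to the prefix sums of diff
theorem rel_update (Y : Int) (arr diff : List Int) (hRel : ArrRel Y arr diff)
    (δ lo hi : Int) (locA : List (Int × Int))
    (hlo : 0 ≤ lo) (hlh : lo ≤ hi) (hhY : hi < Y)
    (hbnd : ∀ p ∈ locA, 0 ≤ p.2 ∧ p.2 < Y)
    (hiff : ∀ k : Int, (∃ p ∈ locA, p.2 = k) ↔ lo ≤ k ∧ k ≤ hi) :
    ArrRel Y ((locA.foldl (fun (ms : PySem.Set Int × List Int) p =>
          if PySem.Set.contains ms.1 p.2 then ms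
          else (PySem.Set.add ms.1 p.2, ms.2.set p.2.toNat (ms.2.getD p.2.toNat 0 + δ)))
        (PySem.Set.empty, arr)).2)
      ((diff.set lo.toNat (diff.getD lo.toNat 0 + δ)).set (hi + 1).toNat
        ((diff.set lo.toNat (diff.getD lo.toNat 0 + δ)).getD (hi + 1).toNat 0 - δ)) := by
  obtain ⟨hal, hdl, hps⟩ := hRel
  have hloN : lo.toNat < diff.length := by omega
  have hhiN : (hi + 1).toNat < diff.length := by omega
  refine ⟨by rw [memoA_len]; exact hal, by simp [hdl], ?_⟩
  intro k hk
  have hbnd' : ∀ p ∈ locA, 0 ≤ p.2 ∧ p.2.toNat < arr.length := by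
    intro p hp
    obtain ⟨h1, h2⟩ := hbnd p hp
    exact ⟨h1, by omega⟩
  rw [memoA_getD δ locA PySem.Set.empty arr hbnd' k]
  have hne : ¬ ((k : Int) ∈ (PySem.Set.empty : PySem.Set Int)) := by
    simp [PySem.Set.empty]
  have e1 := sum_take_set diff lo.toNat (diff.getD lo.toNat 0 + δ) (k + 1) hloN
  have e2 := sum_take_set (diff.set lo.toNat (diff.getD lo.toNat 0 + δ)) (hi + 1).toNat
    ((diff.set lo.toNat (diff.getD lo.toNat 0 + δ)).getD (hi + 1).toNat 0 - δ) (k + 1)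
    (by simpa using hhiN)
  rw [e2, e1, hps k hk]
  by_cases hcond : (∃ p ∈ locA, p.2 = (k : Int))
  · have hrange := (hiff (k : Int)).1 hcond
    have c1 : lo.toNat < k + 1 := by omega
    have c2 : ¬ ((hi + 1).toNat < k + 1) := by omega
    rw [if_pos ⟨hcond, hne⟩, if_pos c1, if_neg c2]
    ring
  · have hrange : ¬ (lo ≤ (k : Int) ∧ (k : Int) ≤ hi) := fun h => hcond ((hiff _).2 h)
    rw [if_neg (fun h => hcond h.1)]
    by_cases hklo : lo.toNat < k + 1
    · have c2 : (hi + 1).toNat < k + 1 := by omega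
      rw [if_pos hklo, if_pos c2]
      ring
    · have c2 : ¬ ((hi + 1).toNat < k + 1) := by omega
      rw [if_neg hklo, if_neg c2]
      ring

-- ===== one component processed by both ports =====
theorem cell_sync (X Y x y : Int) (g : List (List Int))
    (hwf : WF X Y g) (hx0 : 0 ≤ x) (hxX : x < X) (hy0 : 0 ≤ y) (hyY : y < Y)
    (h1 : cellGet g x y = 1) :
    ∃ (gf : List (List Int)) (cnt lo hi : Int) (locA : List (Int × Int)),
      bfsA X Y (gridFuel (cellSet g x y 0)) (cellSet g x y 0) [(x, y)] 0 [(x, y)]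
        = (gf, cnt, locA) ∧
      dfsB X Y (gridFuel (cellSet g x y 0)) (cellSet g x y 0) [(x, y)] 0 y y
        = (gf, cnt, lo, hi) ∧
      WF X Y gf ∧
      0 ≤ lo ∧ lo ≤ hi ∧ hi < Y ∧
      (∀ p ∈ locA, 0 ≤ p.2 ∧ p.2 < Y) ∧
      (∀ k : Int, (∃ p ∈ locA, p.2 = k) ↔ lo ≤ k ∧ k ≤ hi) := by
  have hin : inb X Y (x, y) := ⟨hx0, hxX, hy0, hyY⟩
  have hwf1 : WF X Y (cellSet g x y 0) := WF_cellSet hwf x y 0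
  have hx : x.toNat < g.length := by obtain ⟨e, _⟩ := hwf; omega
  have hy : y.toNat < (g.getD x.toNat []).length := by
    obtain ⟨e1, e2⟩ := hwf
    have : Y.toNat ≤ (g.getD x.toNat []).length := by
      rw [List.getD_eq_getElem g [] hx]; exact e2 _ (List.getElem_mem hx)
    omega
  have hInv0 : LoopInv X Y (cellSet g x y 0) (x, y) (cellSet g x y 0) {(x, y)} [(x, y)] := by
    refine ⟨rfl, ?_, by simp, by simp, ?_, ?_, by simp, ?_⟩
    · intro i j
      by_cases hij : (((i : Int), (j : Int)) : Int × Int) = (x, y)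
      · have hi : i = x.toNat := by
          have := congrArg Prod.fst hij; simp at this; omega
        have hj : j = y.toNat := by
          have := congrArg Prod.snd hij; simp at this; omega
        rw [if_pos (Finset.mem_singleton.2 hij), hi, hj]
        have := val_cellSet hx hy 0 x.toNat y.toNat
        rw [this, if_pos ⟨rfl, rfl⟩]
      · rw [if_neg (fun h => hij (Finset.mem_singleton.1 h))]
    · intro c hc
      rw [Finset.mem_singleton.1 hc]
      exact hin
    · intro c hc
      rw [Finset.mem_singleton.1 hc]
      exact RS.seed
    · intro c hc hcw
      exfalso
      exact hcw (by rw [Finset.mem_singleton.1 hc]; exact List.mem_cons_self ..)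
  have hfuel : ones (cellSet g x y 0) + ([(x, y)] : List (Int × Int)).length
      ≤ gridFuel (cellSet g x y 0) := by
    have := ones_lt_gridFuel (cellSet g x y 0)
    simp only [List.length_cons, List.length_nil]
    omega
  have hcnt0 : (0 : Int) + (([(x, y)] : List (Int × Int)).length : Int)
      = (({(x, y)} : Finset (Int × Int)).card : Int) := by simp
  have hloc0 : ∀ d, d ∈ ([(x, y)] : List (Int × Int)) ↔ d ∈ ({(x, y)} : Finset (Int × Int)) := by
    intro d; simp
  obtain ⟨VA, hInvA, hcntA, hlocA⟩ := runA X Y (cellSet g x y 0) (x, y) hwf1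
    (gridFuel (cellSet g x y 0)) (cellSet g x y 0) {(x, y)} [(x, y)] 0 [(x, y)]
    hInv0 hfuel hcnt0 hloc0
  have hyV : ∀ c ∈ ({(x, y)} : Finset (Int × Int)), y ≤ c.2 := by
    intro c hc; rw [Finset.mem_singleton.1 hc]
  have hyV2 : ∃ c ∈ ({(x, y)} : Finset (Int × Int)), c.2 = y := ⟨(x, y), by simp, rfl⟩
  have hyV3 : ∀ c ∈ ({(x, y)} : Finset (Int × Int)), c.2 ≤ y := by
    intro c hc; rw [Finset.mem_singleton.1 hc]
  obtain ⟨VB, hInvB, hsizeB, hloB1, hloB2, hhiB1, hhiB2⟩ := runB X Y (cellSet g x y 0) (x, y)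
    hwf1 (gridFuel (cellSet g x y 0)) (cellSet g x y 0) {(x, y)} [(x, y)] 0 y y
    hInv0 hfuel hcnt0 hyV hyV2 hyV3 hyV2
  -- the two visited sets agree: both are exactly the RS-reachable cells
  have hVchar : ∀ (V : Finset (Int × Int)) gone,
      LoopInv X Y (cellSet g x y 0) (x, y) gone V [] →
      ∀ d, d ∈ V ↔ RS X Y (cellSet g x y 0) (x, y) d := by
    intro V gone hI d
    exact ⟨fun h => hI.2.2.2.2.2.1 d h, fun h => final_complete hI d h⟩
  have hVAB : VA = VB := by
    apply Finset.ext
    intro d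
    rw [hVchar VA _ hInvA d, hVchar VB _ hInvB d]
  -- final grids agree pointwise hence are equal
  have hgf : (bfsA X Y (gridFuel (cellSet g x y 0)) (cellSet g x y 0) [(x, y)] 0 [(x, y)]).1
      = (dfsB X Y (gridFuel (cellSet g x y 0)) (cellSet g x y 0) [(x, y)] 0 y y).1 := by
    apply grid_ext (hInvA.1.trans hInvB.1.symm)
    intro i j
    rw [hInvA.2.1 i j, hInvB.2.1 i j, hVAB]
  refine ⟨(bfsA X Y (gridFuel (cellSet g x y 0)) (cellSet g x y 0) [(x, y)] 0 [(x, y)]).1,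
    (VA.card : Int),
    (dfsB X Y (gridFuel (cellSet g x y 0)) (cellSet g x y 0) [(x, y)] 0 y y).2.2.1,
    (dfsB X Y (gridFuel (cellSet g x y 0)) (cellSet g x y 0) [(x, y)] 0 y y).2.2.2,
    (bfsA X Y (gridFuel (cellSet g x y 0)) (cellSet g x y 0) [(x, y)] 0 [(x, y)]).2.2,
    ?_, ?_, ?_, ?_, ?_, ?_, ?_, ?_⟩
  · rw [← hcntA]
  · rw [hgf, hVAB, ← hsizeB]
  · exact WF_of_shape hInvA.1 hwf1
  · obtain ⟨c, hc, hce⟩ := hloB2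
    have := hInvB.2.2.2.2.1 c hc
    obtain ⟨e1, e2, e3, e4⟩ := this
    omega
  · obtain ⟨c, hc, _⟩ := hloB2
    have hyin : (x, y) ∈ VB := hVAB ▸ ((hVchar VA _ hInvA (x, y)).2 RS.seed)
    have h1' := hloB1 (x, y) hyin
    have h2' := hhiB1 (x, y) hyin
    omega
  · obtain ⟨c, hc, hce⟩ := hhiB2
    have := hInvB.2.2.2.2.1 c hc
    obtain ⟨e1, e2, e3, e4⟩ := this
    omega
  · intro p hp
    have hpV : p ∈ VA := (hlocA p).1 hp
    have := hInvA.2.2.2.2.1 p hpV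
    obtain ⟨e1, e2, e3, e4⟩ := this
    exact ⟨e3, e4⟩
  · intro k
    constructor
    · rintro ⟨p, hp, rfl⟩
      have hpV : p ∈ VB := hVAB ▸ (hlocA p).1 hp
      exact ⟨hloB1 p hpV, hhiB1 p hpV⟩
    · rintro ⟨hk1, hk2⟩
      have hyin : (x, y) ∈ VB := hVAB ▸ ((hVchar VA _ hInvA (x, y)).2 RS.seed)
      by_cases hky : k ≤ y
      · obtain ⟨cl, hcl, hcle⟩ := hloB2
        have hclRS : RS X Y (cellSet g x y 0) (x, y) cl := (hVchar VB _ hInvB cl).1 hcl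
        obtain ⟨c, hcRS, hck⟩ := rs_ivt X Y (cellSet g x y 0) (x, y) cl hclRS k
          (Or.inr ⟨by omega, by simpa using hky⟩)
        have : c ∈ VA := (hVchar VA _ hInvA c).2 hcRS
        exact ⟨c, (hlocA c).2 this, hck⟩
      · obtain ⟨ch, hch, hche⟩ := hhiB2
        have hchRS : RS X Y (cellSet g x y 0) (x, y) ch := (hVchar VB _ hInvB ch).1 hch
        obtain ⟨c, hcRS, hck⟩ := rs_ivt X Y (cellSet g x y 0) (x, y) ch hchRS k
          (Or.inl ⟨by simpa using (by omega : y ≤ k), by omega⟩)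
        have : c ∈ VA := (hVchar VA _ hInvA c).2 hcRS
        exact ⟨c, (hlocA c).2 this, hck⟩

-- ===== the synchronized outer scan =====
theorem inner_sync (X Y x : Int) : ∀ (ys : List Int) (g : List (List Int)) (arr diff : List Int),
    WF X Y g → ArrRel Y arr diff → (∀ y ∈ ys, 0 ≤ y ∧ y < Y) → 0 ≤ x → x < X →
    (ys.foldl (fun (st : List (List Int) × List Int) y =>
        if cellGet st.1 x y = 1 then
          let loc : List (Int × Int) := [(x, y)]
          let g := cellSet st.1 x y 0
          let r := bfsA X Y (gridFuel g) g [(x, y)] 0 loc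
          let arr2 := (r.2.2.foldl (fun (ms : PySem.Set Int × List Int) p =>
              if PySem.Set.contains ms.1 p.2 then ms
              else (PySem.Set.add ms.1 p.2, ms.2.set p.2.toNat (ms.2.getD p.2.toNat 0 + r.2.1)))
              (PySem.Set.empty, st.2)).2
          (r.1, arr2)
        else st) (g, arr)).1
      = (ys.foldl (fun (st : List (List Int) × List Int) sy =>
        if cellGet st.1 x sy ≠ 1 then st
        else
          let g := cellSet st.1 x sy 0
          let r := dfsB X Y (gridFuel g) g [(x, sy)] 0 sy sy
          let d1 := st.2.set r.2.2.1.toNat (st.2.getD r.2.2.1.toNat 0 + r.2.1)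
          let d2 := d1.set (r.2.2.2 + 1).toNat (d1.getD (r.2.2.2 + 1).toNat 0 - r.2.1)
          (r.1, d2)) (g, diff)).1 ∧
    WF X Y (ys.foldl (fun (st : List (List Int) × List Int) y =>
        if cellGet st.1 x y = 1 then
          let loc : List (Int × Int) := [(x, y)]
          let g := cellSet st.1 x y 0
          let r := bfsA X Y (gridFuel g) g [(x, y)] 0 loc
          let arr2 := (r.2.2.foldl (fun (ms : PySem.Set Int × List Int) p =>
              if PySem.Set.contains ms.1 p.2 then ms
              else (PySem.Set.add ms.1 p.2, ms.2.set p.2.toNat (ms.2.getD p.2.toNat 0 + r.2.1)))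
              (PySem.Set.empty, st.2)).2
          (r.1, arr2)
        else st) (g, arr)).1 ∧
    ArrRel Y (ys.foldl (fun (st : List (List Int) × List Int) y =>
        if cellGet st.1 x y = 1 then
          let loc : List (Int × Int) := [(x, y)]
          let g := cellSet st.1 x y 0
          let r := bfsA X Y (gridFuel g) g [(x, y)] 0 loc
          let arr2 := (r.2.2.foldl (fun (ms : PySem.Set Int × List Int) p =>
              if PySem.Set.contains ms.1 p.2 then ms
              else (PySem.Set.add ms.1 p.2, ms.2.set p.2.toNat (ms.2.getD p.2.toNat 0 + r.2.1)))
              (PySem.Set.empty, st.2)).2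
          (r.1, arr2)
        else st) (g, arr)).2
      (ys.foldl (fun (st : List (List Int) × List Int) sy =>
        if cellGet st.1 x sy ≠ 1 then st
        else
          let g := cellSet st.1 x sy 0
          let r := dfsB X Y (gridFuel g) g [(x, sy)] 0 sy sy
          let d1 := st.2.set r.2.2.1.toNat (st.2.getD r.2.2.1.toNat 0 + r.2.1)
          let d2 := d1.set (r.2.2.2 + 1).toNat (d1.getD (r.2.2.2 + 1).toNat 0 - r.2.1)
          (r.1, d2)) (g, diff)).2
  | [], g, arr, diff, hwf, hRel, _, _, _ => ⟨rfl, hwf, hRel⟩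
  | y :: ys, g, arr, diff, hwf, hRel, hyb, hx0, hxX => by
    obtain ⟨hy0, hyY⟩ := hyb y (List.mem_cons_self ..)
    simp only [List.foldl_cons]
    by_cases h1 : cellGet g x y = 1
    · rw [if_pos h1, if_neg (not_not_intro h1)]
      obtain ⟨gf, cnt, lo, hi, locA, hA, hB, hwf', hlo, hlh, hhY, hbnd, hiff⟩ :=
        cell_sync X Y x y g hwf hx0 hxX hy0 hyY h1
      have hRel' := rel_update Y arr diff hRel cnt lo hi locA hlo hlh hhY hbnd hiff
      simp only [hA, hB]
      exact inner_sync X Y x ys gf _ _ hwf' hRel'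
        (fun q hq => hyb q (List.mem_cons_of_mem _ hq)) hx0 hxX
    · rw [if_neg h1, if_pos h1]
      exact inner_sync X Y x ys g arr diff hwf hRel
        (fun q hq => hyb q (List.mem_cons_of_mem _ hq)) hx0 hxX

theorem outer_sync (X Y : Int) : ∀ (xs : List Int) (gA gB : List (List Int)) (arr diff : List Int),
    gA = gB → WF X Y gA → ArrRel Y arr diff → (∀ x ∈ xs, 0 ≤ x ∧ x < X) →
    WF X Y (xs.foldl (fun st0 x =>
        (PySem.List.pyRange 0 Y 1).foldl (fun (st : List (List Int) × List Int) y =>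
          if cellGet st.1 x y = 1 then
            let loc : List (Int × Int) := [(x, y)]
            let g := cellSet st.1 x y 0
            let r := bfsA X Y (gridFuel g) g [(x, y)] 0 loc
            let arr2 := (r.2.2.foldl (fun (ms : PySem.Set Int × List Int) p =>
                if PySem.Set.contains ms.1 p.2 then ms
                else (PySem.Set.add ms.1 p.2, ms.2.set p.2.toNat (ms.2.getD p.2.toNat 0 + r.2.1)))
                (PySem.Set.empty, st.2)).2
            (r.1, arr2)
          else st) st0) (gA, arr)).1 ∧
    ArrRel Y (xs.foldl (fun st0 x =>
        (PySem.List.pyRange 0 Y 1).foldl (fun (st : List (List Int) × List Int) y =>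
          if cellGet st.1 x y = 1 then
            let loc : List (Int × Int) := [(x, y)]
            let g := cellSet st.1 x y 0
            let r := bfsA X Y (gridFuel g) g [(x, y)] 0 loc
            let arr2 := (r.2.2.foldl (fun (ms : PySem.Set Int × List Int) p =>
                if PySem.Set.contains ms.1 p.2 then ms
                else (PySem.Set.add ms.1 p.2, ms.2.set p.2.toNat (ms.2.getD p.2.toNat 0 + r.2.1)))
                (PySem.Set.empty, st.2)).2
            (r.1, arr2)
          else st) st0) (gA, arr)).2
      (xs.foldl (fun st0 sx =>
        (PySem.List.pyRange 0 Y 1).foldl (fun (st : List (List Int) × List Int) sy =>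
          if cellGet st.1 sx sy ≠ 1 then st
          else
            let g := cellSet st.1 sx sy 0
            let r := dfsB X Y (gridFuel g) g [(sx, sy)] 0 sy sy
            let d1 := st.2.set r.2.2.1.toNat (st.2.getD r.2.2.1.toNat 0 + r.2.1)
            let d2 := d1.set (r.2.2.2 + 1).toNat (d1.getD (r.2.2.2 + 1).toNat 0 - r.2.1)
            (r.1, d2)) st0) (gB, diff)).2
  | [], gA, gB, arr, diff, hg, hwf, hRel, _ => ⟨hwf, hRel⟩
  | x :: xs, gA, gB, arr, diff, hg, hwf, hRel, hxb => by
    obtain ⟨hx0, hxX⟩ := hxb x (List.mem_cons_self ..)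
    have hyb : ∀ y ∈ PySem.List.pyRange 0 Y 1, 0 ≤ y ∧ y < Y := by
      intro y hy
      have := PySem.List.mem_pyRange_one.1 hy
      exact ⟨this.1, this.2⟩
    subst hg
    obtain ⟨heq, hwf', hRel'⟩ :=
      inner_sync X Y x (PySem.List.pyRange 0 Y 1) gA arr diff hwf hRel hyb hx0 hxX
    simp only [List.foldl_cons]
    exact outer_sync X Y xs _ _ _ _ heq hwf' hRel'
      (fun q hq => hxb q (List.mem_cons_of_mem _ hq))

-- ===== the final sweep: max(arr) = best/acc loop over diff[:cols] =====
theorem accs_length : ∀ (ds : List Int) (a : Int), (accs a ds).length = ds.length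
  | [], _ => rfl
  | d :: ds, a => by simp [accs, accs_length ds (a + d)]

theorem accs_getD : ∀ (ds : List Int) (a : Int) (k : Nat), k < ds.length →
    (accs a ds).getD k 0 = a + ((ds.take (k + 1)).sum)
  | [], a, k, h => by simp at h
  | d :: ds, a, 0, _ => by simp [accs]
  | d :: ds, a, k + 1, h => by
    have ih := accs_getD ds (a + d) k (by simpa using h)
    show (accs (a + d) ds).getD k 0 = a + ((d :: ds).take (k + 1 + 1)).sum
    rw [ih, List.take_succ_cons, List.sum_cons]
    ring

theorem bestFold_some : ∀ (ds : List Int) (b a : Int),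
    ds.foldl (fun (p : Option Int × Int) d =>
        let acc := p.2 + d
        ((match p.1 with
          | none => some acc
          | some b => if acc > b then some acc else some b), acc)) (some b, a)
      = (some ((accs a ds).foldl max b), a + ds.sum)
  | [], b, a => by simp [accs]
  | d :: ds, b, a => by
    have hmax : (if a + d > b then some (a + d) else some b) = some (max b (a + d)) := by
      split_ifs with h
      · rw [max_eq_right (by omega)]
      · rw [max_eq_left (by omega)]
    have ih := bestFold_some ds (max b (a + d)) (a + d)
    show ds.foldl _ ((if a + d > b then some (a + d) else some b), a + d)
      = (some ((accs a (d :: ds)).foldl max b), a + (d :: ds).sum)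
    rw [hmax, ih]
    simp only [accs, List.foldl_cons, List.sum_cons]
    rw [add_assoc]

theorem final_max (Y : Int) (hY : 0 < Y) (arr diff : List Int) (hRel : ArrRel Y arr diff) :
    (PySem.List.max? arr (fun v => v)).getD 0 =
    (((PySem.List.slice diff none (some Y)).foldl
        (fun (p : Option Int × Int) d =>
          let acc := p.2 + d
          ((match p.1 with
            | none => some acc
            | some b => if acc > b then some acc else some b), acc)) ((none : Option Int), 0)).1).getD 0 := by
  obtain ⟨hal, hdl, hps⟩ := hRel
  rw [PySem.List.slice_to diff (by omega)]
  have hdslen : (diff.take Y.toNat).length = Y.toNat := by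
    rw [List.length_take]
    omega
  have harr : arr = accs 0 (diff.take Y.toNat) := by
    apply list_eq_of_getD (by rw [accs_length]; omega)
    intro k
    by_cases hk : k < Y.toNat
    · rw [hps k hk, accs_getD _ 0 k (by omega), List.take_take]
      have : min (k + 1) Y.toNat = k + 1 := by omega
      rw [this]
      ring
    · have h1 : arr.getD k 0 = 0 := by
        rw [List.getD_eq_getElem?_getD, List.getElem?_eq_none (by omega)]
        rfl
      have h2 : (accs 0 (diff.take Y.toNat)).getD k 0 = 0 := by
        rw [List.getD_eq_getElem?_getD, List.getElem?_eq_none (by rw [accs_length]; omega)]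
        rfl
      rw [h1, h2]
  match hds : diff.take Y.toNat with
  | [] => rw [hds] at hdslen; simp at hdslen; omega
  | d :: t =>
    rw [hds] at harr
    have hfirst : ((d :: t).foldl
        (fun (p : Option Int × Int) e =>
          let acc := p.2 + e
          ((match p.1 with
            | none => some acc
            | some b => if acc > b then some acc else some b), acc)) ((none : Option Int), 0))
        = t.foldl _ ((some (0 + d) : Option Int), 0 + d) := rfl
    rw [hfirst, bestFold_some t (0 + d) (0 + d)]
    have harr' : arr = (0 + d) :: accs (0 + d) t := by rw [harr]; simp [accs]
    rw [harr', PySem.List.max?_id_cons]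

-- ===== assembling the whole programs =====
theorem solution_eq_alt : ∀ (land : List (List Int)), Pre_solution land →
    solution land = solution_alt land := by
  intro land hpre
  obtain ⟨hne, hY0, hrows⟩ := hpre
  have hwf : WF (PySem.List.len land) (PySem.List.len (land.headD [])) land := by
    constructor
    · simp [PySem.List.len_eq]
    · intro r hr
      simpa [PySem.List.len_eq] using hrows r hr
  have hY : 0 < PySem.List.len (land.headD []) := by
    simp only [PySem.List.len_eq]
    omega
  have hRel0 : ArrRel (PySem.List.len (land.headD []))
      (List.replicate (PySem.List.len (land.headD [])).toNat 0)
      (List.replicate ((PySem.List.len (land.headD [])).toNat + 1) 0) := by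
    refine ⟨by simp, by simp, ?_⟩
    intro k hk
    rw [List.take_replicate]
    simp
  have hxb : ∀ x ∈ PySem.List.pyRange 0 (PySem.List.len land) 1,
      0 ≤ x ∧ x < PySem.List.len land := by
    intro x hx
    have := PySem.List.mem_pyRange_one.1 hx
    exact ⟨this.1, this.2⟩
  obtain ⟨hwfF, hRelF⟩ := outer_sync (PySem.List.len land) (PySem.List.len (land.headD []))
    (PySem.List.pyRange 0 (PySem.List.len land) 1) land land
    (List.replicate (PySem.List.len (land.headD [])).toNat 0)
    (List.replicate ((PySem.List.len (land.headD [])).toNat + 1) 0)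
    rfl hwf hRel0 hxb
  simp only [solution, solution_alt]
  exact final_max (PySem.List.len (land.headD [])) hY _ _ hRelF

-- ===== VERDICT (by name: the statement is the Claim_ definition above) =====
theorem solution_spec : Claim_equal_solution := by
  unfold Claim_equal_solution
  intro land _ hpre
  unfold Spec_solution
  exact solution_eq_alt land hpre
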